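-- pv_equiv track=rewrite | github.com/gggliuye/foobar | test_1.py | solution0
-- ===== SOURCE A (Python) =====
-- def solution0(data, n):
--     # Your code here
--     max_num = 100
--     data_sum = [0 for i in range(max_num)]
--
--     check_list = []
--     for ele in data:
--         if data_sum[ele] > n:
--             continue
--         data_sum[ele] = data_sum[ele] + 1
--         if data_sum[ele] <= n:
--             check_list.append(ele)
--
--     result = []
--     for ele in check_list:
--         if data_sum[ele] > 0 and data_sum[ele] <= n:
--             result.append(ele)
--
--         data_sum[ele] = 0
--     return result
-- ===== SOURCE B (Python) =====
-- def solution0(data, n):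
--     # Count every element into a fixed 100-slot table (Python's negative
--     # indexing handles negative values the same way A's table does), then
--     # emit each value's first occurrence iff its total count is at most n.
--     counts = [0] * 100
--     for ele in data:
--         counts[ele] += 1
--     emitted = [False] * 100
--     result = []
--     for ele in data:
--         if not emitted[ele]:
--             emitted[ele] = True
--             if counts[ele] <= n:
--                 result.append(ele)
--     return result
-- ===== Notes on version B (the rewrite author's own statement) =====
-- stated objective: simpler
-- what changed: A caps counts at n+1 while building an intermediate check_list and then does a destructive emit-and-reset pass over it; B just counts all occurrences into the 100-slot table in one pass and then emits each value's first occurrence iff its total count is at most n, using a parallel 100-slot seen table.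
-- outside the precondition, e.g. on solution0([150], 1): A raises IndexError, B raises IndexError
import Mathlib
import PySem

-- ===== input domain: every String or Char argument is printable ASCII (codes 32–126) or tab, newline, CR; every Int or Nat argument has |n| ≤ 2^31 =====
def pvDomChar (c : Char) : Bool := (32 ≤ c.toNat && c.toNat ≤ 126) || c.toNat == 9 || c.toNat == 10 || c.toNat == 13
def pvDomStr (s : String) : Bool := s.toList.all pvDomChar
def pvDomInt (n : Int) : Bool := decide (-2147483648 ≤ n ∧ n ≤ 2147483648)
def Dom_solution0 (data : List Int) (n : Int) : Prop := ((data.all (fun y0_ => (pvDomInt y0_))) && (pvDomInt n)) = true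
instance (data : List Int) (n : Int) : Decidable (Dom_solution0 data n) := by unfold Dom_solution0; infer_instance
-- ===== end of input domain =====

-- B replaces A's capped count + check_list + destructive-reset second pass by a plain
-- full count pass followed by one first-occurrence filter pass over the data (simpler).

-- ===== PORT A =====
-- first loop body: capped count into the 100-slot table, appending kept occurrences
def pvStepA1 (n : Int) : List Int × List Int → Int → List Int × List Int
  | (ds, check), ele =>
    if PySem.List.pyGetD ds ele 0 > n then (ds, check)
    else
      let ds' := PySem.List.pySetD ds ele (PySem.List.pyGetD ds ele 0 + 1)
      if PySem.List.pyGetD ds' ele 0 ≤ n then (ds', check ++ [ele]) else (ds', check)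

-- second loop body: emit-and-reset over check_list
def pvStepA2 (n : Int) : List Int × List Int → Int → List Int × List Int
  | (ds, result), ele =>
    (PySem.List.pySetD ds ele 0,
     if PySem.List.pyGetD ds ele 0 > 0 ∧ PySem.List.pyGetD ds ele 0 ≤ n
     then result ++ [ele] else result)

def solution0 (data : List Int) (n : Int) : List Int :=
  let data_sum : List Int := (PySem.List.pyRange 0 100 1).map (fun _ => 0)
  let st := data.foldl (pvStepA1 n) (data_sum, [])
  let st2 := st.2.foldl (pvStepA2 n) (st.1, [])
  st2.2

-- ===== PORT B =====
-- counting pass body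
def pvStepC (cs : List Int) (ele : Int) : List Int :=
  PySem.List.pySetD cs ele (PySem.List.pyGetD cs ele 0 + 1)

-- emission pass body: first occurrence per table slot, kept iff its count ≤ n
def pvStepB (n : Int) (counts : List Int) : List Bool × List Int → Int → List Bool × List Int
  | (emitted, res), ele =>
    if PySem.List.pyGetD emitted ele false = false then
      (PySem.List.pySetD emitted ele true,
       if PySem.List.pyGetD counts ele 0 ≤ n then res ++ [ele] else res)
    else (emitted, res)

def solution0_alt (data : List Int) (n : Int) : List Int :=
  let counts := data.foldl pvStepC (List.replicate 100 (0 : Int))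
  let st := data.foldl (pvStepB n counts) (List.replicate 100 false, [])
  st.2

-- ===== PRECONDITION & SPEC =====
-- Pre_ excludes exactly the inputs where the Python A raises IndexError: an element
-- outside [-100, 100) is used as an index into the 100-slot table.
def Pre_solution0 (data : List Int) (n : Int) : Prop := ∀ x ∈ data, -100 ≤ x ∧ x < 100
instance (data : List Int) (n : Int) : Decidable (Pre_solution0 data n) := by
  unfold Pre_solution0; infer_instance

def pvWitness_solution0 : List Int × Int := ([1, 2, 1, -5, 2, 2], 2)

def Spec_solution0 (data : List Int) (n : Int) (out : List Int) : Prop := out = solution0_alt data n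
instance (data : List Int) (n : Int) (out : List Int) : Decidable (Spec_solution0 data n out) := by
  unfold Spec_solution0; infer_instance

-- ===== CLAIM (what is proved, stated in full; the proofs are below) =====
def Claim_equal_solution0 : Prop := ∀ (data : List Int) (n : Int), Dom_solution0 data n → Pre_solution0 data n → Spec_solution0 data n (solution0 data n)

-- ===== LEMMAS AND PROOFS =====

-- the table slot a value e indexes under Python's negative indexing into a 100-slot list
def pvIx (e : Int) : Nat := (e % 100).toNat

-- number of occurrences of slot i in p
def pvCnt (p : List Int) (i : Nat) : Nat := p.countP (fun e => pvIx e == i)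

-- the elements A's first loop appends to check_list: occurrences 1..max n 0 of each slot
def pvSel (n : Int) : List Int → (Nat → Nat) → List Int
  | [], _ => []
  | e :: p, c =>
    if (c (pvIx e) : Int) < max n 0
    then e :: pvSel n p (fun i => if i = pvIx e then c i + 1 else c i)
    else pvSel n p (fun i => if i = pvIx e then c i + 1 else c i)

-- first occurrence of each slot not yet seen
def pvDf : List Int → List Nat → List Int
  | [], _ => []
  | e :: p, seen => if pvIx e ∈ seen then pvDf p seen else e :: pvDf p (pvIx e :: seen)

theorem pvIx_lt (e : Int) : pvIx e < 100 := by
  unfold pvIx; omega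

theorem pvGetD_ix {α : Type} (s : List α) (hs : s.length = 100) (e : Int) (h1 : -100 ≤ e)
    (h2 : e < 100) (d : α) : PySem.List.pyGetD s e d = s.getD (pvIx e) d := by
  unfold PySem.List.pyGetD PySem.List.pyGet? PySem.List.pyIdx?
  by_cases h : 0 ≤ e
  · rw [if_pos h, hs, if_pos (by omega)]
    have : pvIx e = e.toNat := by unfold pvIx; omega
    simp [this, List.getD_eq_getElem?_getD]
  · rw [if_neg h, hs, if_pos (by omega)]
    have : pvIx e = 100 - (-e).toNat := by unfold pvIx; omega
    simp [this, List.getD_eq_getElem?_getD]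

theorem pvSetD_ix {α : Type} (s : List α) (hs : s.length = 100) (e : Int) (h1 : -100 ≤ e)
    (h2 : e < 100) (v : α) : PySem.List.pySetD s e v = s.set (pvIx e) v := by
  unfold PySem.List.pySetD PySem.List.pySet? PySem.List.pyIdx?
  by_cases h : 0 ≤ e
  · rw [if_pos h, hs, if_pos (by omega)]
    have : pvIx e = e.toNat := by unfold pvIx; omega
    simp [this]
  · rw [if_neg h, hs, if_pos (by omega)]
    have : pvIx e = 100 - (-e).toNat := by unfold pvIx; omega
    simp [this]

theorem pvGetD_set {α : Type} (s : List α) (j : Nat) (hj : j < s.length) (v : α) (i : Nat)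
    (d : α) : (s.set j v).getD i d = if i = j then v else s.getD i d := by
  by_cases h : i = j
  · subst h; simp [List.getD_eq_getElem?_getD, List.getElem?_set, hj]
  · simp [List.getD_eq_getElem?_getD, List.getElem?_set, h, Ne.symm h]

theorem pvCnt_cons (e : Int) (p : List Int) (i : Nat) :
    pvCnt (e :: p) i = (if pvIx e = i then 1 else 0) + pvCnt p i := by
  simp [pvCnt, List.countP_cons]
  by_cases h : pvIx e = i <;> simp [h] <;> omega

theorem pvCnt_nil (i : Nat) : pvCnt [] i = 0 := rfl

theorem pvSel_subset (n : Int) : ∀ (p : List Int) (c : Nat → Nat) (e : Int),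
    e ∈ pvSel n p c → e ∈ p := by
  intro p
  induction p with
  | nil => intro c e h; simp [pvSel] at h
  | cons a p ih =>
    intro c e h
    simp only [pvSel] at h
    split at h
    · rcases List.mem_cons.mp h with h | h
      · simp [h]
      · exact List.mem_cons_of_mem _ (ih _ _ h)
    · exact List.mem_cons_of_mem _ (ih _ _ h)

theorem pvDf_subset : ∀ (p : List Int) (seen : List Nat) (e : Int),
    e ∈ pvDf p seen → e ∈ p := by
  intro p
  induction p with
  | nil => intro seen e h; simp [pvDf] at h
  | cons a p ih =>
    intro seen e h
    simp only [pvDf] at h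
    split at h
    · exact List.mem_cons_of_mem _ (ih _ _ h)
    · rcases List.mem_cons.mp h with h | h
      · simp [h]
      · exact List.mem_cons_of_mem _ (ih _ _ h)

theorem pvCnt_pos_of_mem (p : List Int) (e : Int) (he : e ∈ p) : 0 < pvCnt p (pvIx e) :=
  List.countP_pos_iff.mpr ⟨e, he, by simp⟩

-- nonpositive n: A's first loop keeps nothing
theorem pvSel_nonpos (n : Int) (hn : n ≤ 0) : ∀ (p : List Int) (c : Nat → Nat),
    pvSel n p c = [] := by
  intro p
  induction p with
  | nil => intro c; rfl
  | cons a p ih =>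
    intro c
    simp only [pvSel]
    rw [if_neg (by omega)]
    exact ih _

-- positive n: selecting the first n occurrences of each slot keeps first occurrences
theorem pvDf_sel (n : Int) (hn : 1 ≤ n) : ∀ (p : List Int) (seen : List Nat) (c : Nat → Nat),
    (∀ i, (c i : Int) < max n 0 ∨ i ∈ seen) →
    pvDf (pvSel n p c) seen = pvDf p seen := by
  intro p
  induction p with
  | nil => intro seen c _; rfl
  | cons a p ih =>
    intro seen c hc
    simp only [pvSel, pvDf]
    by_cases hmem : pvIx a ∈ seen
    · have hrec : ∀ i, ((if i = pvIx a then c i + 1 else c i : Nat) : Int) < max n 0 ∨ i ∈ seen := by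
        intro i
        by_cases hi : i = pvIx a
        · right; rw [hi]; exact hmem
        · simpa [hi] using hc i
      split
      · simp only [pvDf, if_pos hmem]
        exact ih seen _ hrec
      · rw [ih seen _ hrec]
        try simp only [pvDf, if_pos hmem]
    · have hlt : (c (pvIx a) : Int) < max n 0 := (hc (pvIx a)).resolve_right hmem
      rw [if_pos hlt]
      simp only [pvDf, if_neg hmem]
      have hrec : ∀ i, ((if i = pvIx a then c i + 1 else c i : Nat) : Int) < max n 0 ∨
          i ∈ pvIx a :: seen := by
        intro i
        by_cases hi : i = pvIx a
        · right; rw [hi]; exact List.mem_cons_self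
        · rcases hc i with h | h
          · left; simpa [hi] using h
          · right; exact List.mem_cons_of_mem _ h
      rw [ih _ _ hrec]

-- A's first loop
theorem pvLoop1 (n : Int) : ∀ (p : List Int), (∀ e ∈ p, -100 ≤ e ∧ e < 100) →
    ∀ (s ch : List Int) (c : Nat → Nat), s.length = 100 →
    (∀ i, i < 100 → s.getD i 0 = min (c i : Int) (max (n + 1) 0)) →
    ∃ S : List Int, p.foldl (pvStepA1 n) (s, ch) = (S, ch ++ pvSel n p c) ∧ S.length = 100 ∧
      (∀ i, i < 100 → S.getD i 0 = min ((c i + pvCnt p i : Nat) : Int) (max (n + 1) 0)) := by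
  intro p
  induction p with
  | nil =>
    intro _ s ch c hs hinv
    exact ⟨s, by simp [pvSel], hs, by
      intro i hi; rw [hinv i hi]; simp [pvCnt_nil]⟩
  | cons e p ih =>
    intro hp s ch c hs hinv
    have he := hp e (List.mem_cons_self)
    have hp' : ∀ x ∈ p, -100 ≤ x ∧ x < 100 := fun x hx => hp x (List.mem_cons_of_mem _ hx)
    have hj := pvIx_lt e
    have hsval : PySem.List.pyGetD s e 0 = min (c (pvIx e) : Int) (max (n + 1) 0) := by
      rw [pvGetD_ix s hs e he.1 he.2, hinv _ hj]
    rw [List.foldl_cons]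
    set c' : Nat → Nat := fun i => if i = pvIx e then c i + 1 else c i with hc'
    have hcnt : ∀ i, i < 100 → (c' i + pvCnt p i : Nat) = c i + pvCnt (e :: p) i := by
      intro i _
      rw [pvCnt_cons, hc']
      by_cases hie : i = pvIx e <;> simp [hie] <;> try omega
    by_cases hgt : PySem.List.pyGetD s e 0 > n
    · -- skip branch: slot already over n
      have hstep : pvStepA1 n (s, ch) e = (s, ch) := by
        simp only [pvStepA1]; rw [if_pos hgt]
      rw [hstep]
      have hgt' : min (c (pvIx e) : Int) (max (n + 1) 0) > n := by rw [← hsval]; exact hgt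
      have hinv' : ∀ i, i < 100 → s.getD i 0 = min (c' i : Int) (max (n + 1) 0) := by
        intro i hi
        rw [hinv i hi, hc']
        by_cases hie : i = pvIx e
        · subst hie; simp; omega
        · simp [hie]
      obtain ⟨S, h1, h2, h3⟩ := ih hp' s ch c' hs hinv'
      refine ⟨S, ?_, h2, ?_⟩
      · rw [h1]
        have : pvSel n (e :: p) c = pvSel n p c' := by
          simp only [pvSel]; rw [if_neg (by omega), hc']
        rw [this]
      · intro i hi; rw [h3 i hi, hcnt i hi]
    · -- count branch
      push_neg at hgt
      have hle : min (c (pvIx e) : Int) (max (n + 1) 0) ≤ n := by rw [← hsval]; exact hgt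
      have hcle : (c (pvIx e) : Int) ≤ n ∧ 0 ≤ n := by constructor <;> omega
      have hmin : min (c (pvIx e) : Int) (max (n + 1) 0) = (c (pvIx e) : Int) := by omega
      have hset : PySem.List.pySetD s e (PySem.List.pyGetD s e 0 + 1) =
          s.set (pvIx e) ((c (pvIx e) : Int) + 1) := by
        rw [hsval, hmin, pvSetD_ix s hs e he.1 he.2]
      have hlen' : (s.set (pvIx e) ((c (pvIx e) : Int) + 1)).length = 100 := by
        simp [hs]
      have hget' : PySem.List.pyGetD (s.set (pvIx e) ((c (pvIx e) : Int) + 1)) e 0 =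
          (c (pvIx e) : Int) + 1 := by
        rw [pvGetD_ix _ hlen' e he.1 he.2, pvGetD_set s _ (by omega) _ _ _, if_pos rfl]
      have hinv' : ∀ i, i < 100 →
          (s.set (pvIx e) ((c (pvIx e) : Int) + 1)).getD i 0 =
            min (c' i : Int) (max (n + 1) 0) := by
        intro i hi
        rw [pvGetD_set s _ (by omega) _ _ _, hc']
        by_cases hie : i = pvIx e
        · subst hie; simp; omega
        · simp [hie]; exact hinv i hi
      by_cases happ : PySem.List.pyGetD (s.set (pvIx e) ((c (pvIx e) : Int) + 1)) e 0 ≤ n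
      · have hstep : pvStepA1 n (s, ch) e =
            (s.set (pvIx e) ((c (pvIx e) : Int) + 1), ch ++ [e]) := by
          simp only [pvStepA1]
          rw [if_neg (by omega), hset, if_pos happ]
        rw [hstep]
        obtain ⟨S, h1, h2, h3⟩ := ih hp' _ (ch ++ [e]) c' hlen' hinv'
        refine ⟨S, ?_, h2, ?_⟩
        · rw [h1]
          have hc1 : (c (pvIx e) : Int) + 1 ≤ n := by rw [← hget']; exact happ
          have : pvSel n (e :: p) c = e :: pvSel n p c' := by
            simp only [pvSel]; rw [if_pos (by omega), hc']
          rw [this, List.append_assoc]; rfl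
        · intro i hi; rw [h3 i hi, hcnt i hi]
      · have hstep : pvStepA1 n (s, ch) e =
            (s.set (pvIx e) ((c (pvIx e) : Int) + 1), ch) := by
          simp only [pvStepA1]
          rw [if_neg (by omega), hset, if_neg happ]
        rw [hstep]
        obtain ⟨S, h1, h2, h3⟩ := ih hp' _ ch c' hlen' hinv'
        refine ⟨S, ?_, h2, ?_⟩
        · rw [h1]
          have hc1 : ¬ ((c (pvIx e) : Int) + 1 ≤ n) := by rw [← hget']; exact happ
          have : pvSel n (e :: p) c = pvSel n p c' := by
            simp only [pvSel]; rw [if_neg (by omega), hc']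
          rw [this]
        · intro i hi; rw [h3 i hi, hcnt i hi]

-- A's second loop: emit the first element of each slot whose stored value is in (0, n]
theorem pvLoop2 (n : Int) (v : Nat → Int) : ∀ (r : List Int), (∀ e ∈ r, -100 ≤ e ∧ e < 100) →
    ∀ (s res : List Int) (seen : List Nat), s.length = 100 →
    (∀ i, i < 100 → s.getD i 0 = if i ∈ seen then 0 else v i) →
    (r.foldl (pvStepA2 n) (s, res)).2 =
      res ++ (pvDf r seen).filter (fun e => decide (0 < v (pvIx e) ∧ v (pvIx e) ≤ n)) := by
  intro r
  induction r with
  | nil => intro _ s res seen _ _; simp [pvDf]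
  | cons e r ih =>
    intro hr s res seen hs hinv
    have he := hr e (List.mem_cons_self)
    have hr' : ∀ x ∈ r, -100 ≤ x ∧ x < 100 := fun x hx => hr x (List.mem_cons_of_mem _ hx)
    have hj := pvIx_lt e
    have hsval : PySem.List.pyGetD s e 0 = if pvIx e ∈ seen then 0 else v (pvIx e) := by
      rw [pvGetD_ix s hs e he.1 he.2, hinv _ hj]
    have hset : PySem.List.pySetD s e 0 = s.set (pvIx e) 0 := pvSetD_ix s hs e he.1 he.2 0
    have hlen' : (s.set (pvIx e) 0).length = 100 := by simp [hs]
    rw [List.foldl_cons]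
    by_cases hmem : pvIx e ∈ seen
    · have hval0 : PySem.List.pyGetD s e 0 = 0 := by rw [hsval, if_pos hmem]
      have hstep : pvStepA2 n (s, res) e = (s.set (pvIx e) 0, res) := by
        simp only [pvStepA2]
        rw [hset, hval0, if_neg (by omega)]
      rw [hstep]
      have hinv' : ∀ i, i < 100 → (s.set (pvIx e) 0).getD i 0 = if i ∈ seen then 0 else v i := by
        intro i hi
        rw [pvGetD_set s _ (by omega) _ _ _]
        by_cases hie : i = pvIx e
        · subst hie; simp [hmem]
        · rw [if_neg hie]; exact hinv i hi
      rw [ih hr' _ res seen hlen' hinv']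
      simp only [pvDf, if_pos hmem]
    · have hval : PySem.List.pyGetD s e 0 = v (pvIx e) := by rw [hsval, if_neg hmem]
      have hinv' : ∀ i, i < 100 →
          (s.set (pvIx e) 0).getD i 0 = if i ∈ pvIx e :: seen then 0 else v i := by
        intro i hi
        rw [pvGetD_set s _ (by omega) _ _ _]
        by_cases hie : i = pvIx e
        · subst hie; simp
        · rw [if_neg hie]
          rw [hinv i hi]
          simp [List.mem_cons, hie]
      by_cases hcond : 0 < v (pvIx e) ∧ v (pvIx e) ≤ n
      · have hstep : pvStepA2 n (s, res) e = (s.set (pvIx e) 0, res ++ [e]) := by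
          simp only [pvStepA2]
          rw [hset, hval, if_pos hcond]
        rw [hstep, ih hr' _ (res ++ [e]) _ hlen' hinv']
        simp only [pvDf, if_neg hmem]
        rw [List.filter_cons_of_pos (by simpa using hcond), List.append_assoc]
        rfl
      · have hstep : pvStepA2 n (s, res) e = (s.set (pvIx e) 0, res) := by
          simp only [pvStepA2]
          rw [hset, hval, if_neg hcond]
        rw [hstep, ih hr' _ res _ hlen' hinv']
        simp only [pvDf, if_neg hmem]
        rw [List.filter_cons_of_neg (by simpa using hcond)]

-- B's counting loop
theorem pvLoopC : ∀ (p : List Int), (∀ e ∈ p, -100 ≤ e ∧ e < 100) →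
    ∀ (s : List Int) (c : Nat → Nat), s.length = 100 →
    (∀ i, i < 100 → s.getD i 0 = (c i : Int)) →
    ∃ S : List Int, p.foldl pvStepC s = S ∧ S.length = 100 ∧
      (∀ i, i < 100 → S.getD i 0 = ((c i + pvCnt p i : Nat) : Int)) := by
  intro p
  induction p with
  | nil =>
    intro _ s c hs hinv
    exact ⟨s, rfl, hs, by intro i hi; rw [hinv i hi]; simp [pvCnt_nil]⟩
  | cons e p ih =>
    intro hp s c hs hinv
    have he := hp e (List.mem_cons_self)
    have hp' : ∀ x ∈ p, -100 ≤ x ∧ x < 100 := fun x hx => hp x (List.mem_cons_of_mem _ hx)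
    have hj := pvIx_lt e
    rw [List.foldl_cons]
    have hstep : pvStepC s e = s.set (pvIx e) ((c (pvIx e) : Int) + 1) := by
      unfold pvStepC
      rw [pvGetD_ix s hs e he.1 he.2, pvSetD_ix s hs e he.1 he.2, hinv _ hj]
    rw [hstep]
    set c' : Nat → Nat := fun i => if i = pvIx e then c i + 1 else c i with hc'
    have hlen' : (s.set (pvIx e) ((c (pvIx e) : Int) + 1)).length = 100 := by simp [hs]
    have hinv' : ∀ i, i < 100 →
        (s.set (pvIx e) ((c (pvIx e) : Int) + 1)).getD i 0 = (c' i : Int) := by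
      intro i hi
      rw [pvGetD_set s _ (by omega) _ _ _, hc']
      by_cases hie : i = pvIx e
      · subst hie; simp
      · simp [hie]; exact hinv i hi
    obtain ⟨S, h1, h2, h3⟩ := ih hp' _ c' hlen' hinv'
    refine ⟨S, h1, h2, ?_⟩
    intro i hi
    rw [h3 i hi]
    congr 1
    rw [pvCnt_cons, hc']
    by_cases hie : i = pvIx e <;> simp [hie] <;> try omega

-- B's emission loop
theorem pvLoopB (n : Int) (C : List Int) (hC : C.length = 100) (w : Nat → Int)
    (hw : ∀ i, i < 100 → C.getD i 0 = w i) :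
    ∀ (p : List Int), (∀ e ∈ p, -100 ≤ e ∧ e < 100) →
    ∀ (em : List Bool) (res : List Int) (seen : List Nat), em.length = 100 →
    (∀ i, i < 100 → em.getD i false = decide (i ∈ seen)) →
    (p.foldl (pvStepB n C) (em, res)).2 =
      res ++ (pvDf p seen).filter (fun e => decide (w (pvIx e) ≤ n)) := by
  intro p
  induction p with
  | nil => intro _ em res seen _ _; simp [pvDf]
  | cons e p ih =>
    intro hp em res seen hem hinv
    have he := hp e (List.mem_cons_self)
    have hp' : ∀ x ∈ p, -100 ≤ x ∧ x < 100 := fun x hx => hp x (List.mem_cons_of_mem _ hx)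
    have hj := pvIx_lt e
    have hval : PySem.List.pyGetD em e false = decide (pvIx e ∈ seen) := by
      rw [pvGetD_ix em hem e he.1 he.2, hinv _ hj]
    have hCval : PySem.List.pyGetD C e 0 = w (pvIx e) := by
      rw [pvGetD_ix C hC e he.1 he.2, hw _ hj]
    rw [List.foldl_cons]
    by_cases hmem : pvIx e ∈ seen
    · have hstep : pvStepB n C (em, res) e = (em, res) := by
        simp only [pvStepB]
        rw [hval, if_neg (by simp [hmem])]
      rw [hstep, ih hp' em res seen hem hinv]
      simp only [pvDf, if_pos hmem]
    · have hset : PySem.List.pySetD em e true = em.set (pvIx e) true :=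
        pvSetD_ix em hem e he.1 he.2 true
      have hlen' : (em.set (pvIx e) true).length = 100 := by simp [hem]
      have hinv' : ∀ i, i < 100 →
          (em.set (pvIx e) true).getD i false = decide (i ∈ pvIx e :: seen) := by
        intro i hi
        rw [pvGetD_set em _ (by omega) _ _ _]
        by_cases hie : i = pvIx e
        · subst hie; simp
        · rw [if_neg hie, hinv i hi]
          simp [List.mem_cons, hie]
      have hstep : pvStepB n C (em, res) e =
          (em.set (pvIx e) true,
           if w (pvIx e) ≤ n then res ++ [e] else res) := by
        simp only [pvStepB]
        rw [hval, if_pos (by simp [hmem]), hset, hCval]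
      rw [hstep]
      by_cases hcond : w (pvIx e) ≤ n
      · rw [if_pos hcond, ih hp' _ (res ++ [e]) _ hlen' hinv']
        simp only [pvDf, if_neg hmem]
        rw [List.filter_cons_of_pos (by simpa using hcond), List.append_assoc]
        rfl
      · rw [if_neg hcond, ih hp' _ res _ hlen' hinv']
        simp only [pvDf, if_neg hmem]
        rw [List.filter_cons_of_neg (by simpa using hcond)]

-- the initial 100-slot tables
theorem pvInitA : ((PySem.List.pyRange 0 100 1).map (fun _ => (0 : Int))).length = 100 ∧
    ∀ i, i < 100 → ((PySem.List.pyRange 0 100 1).map (fun _ => (0 : Int))).getD i 0 = 0 := by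
  have h : (PySem.List.pyRange 0 100 1).map (fun _ => (0 : Int)) = List.replicate 100 0 := by
    decide
  rw [h]
  refine ⟨by simp, ?_⟩
  intro i hi
  rw [List.getD_eq_getElem?_getD, List.getElem?_replicate, if_pos hi]
  rfl

theorem pvInitRep {α : Type} (a d : α) : ∀ i, i < 100 → (List.replicate 100 a).getD i d = a := by
  intro i hi
  rw [List.getD_eq_getElem?_getD, List.getElem?_replicate, if_pos hi]
  rfl

-- ===== VERDICT (by name: the statement is the Claim_ definition above) =====
theorem solution0_spec : Claim_equal_solution0 := by
  intro data n _ hpre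
  simp only [Spec_solution0, solution0, solution0_alt]
  -- A side
  obtain ⟨hlenA, hgetA⟩ := pvInitA
  obtain ⟨S, h1, h2, h3⟩ := pvLoop1 n data hpre _ [] (fun _ => 0) hlenA
    (by intro i hi; rw [hgetA i hi]; simp only [Nat.cast_zero]; omega)
  rw [h1]
  simp only [List.nil_append]

  rw [pvLoop2 n (fun i => min ((pvCnt data i : Nat) : Int) (max (n + 1) 0))
    (pvSel n data (fun _ => 0))
    (fun e hepv => hpre e (pvSel_subset n data _ e hepv))
    S [] [] h2 (by intro i hi; rw [h3 i hi]; simp)]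
  -- B side
  obtain ⟨C, hc1, hc2, hc3⟩ := pvLoopC data hpre (List.replicate 100 0) (fun _ => 0)
    (by simp) (by intro i hi; rw [pvInitRep (0 : Int) 0 i hi]; simp)
  rw [hc1]
  rw [pvLoopB n C hc2 (fun i => ((pvCnt data i : Nat) : Int))
    (by intro i hi; rw [hc3 i hi]; simp) data hpre (List.replicate 100 false) [] []
    (by simp) (by intro i hi; rw [pvInitRep false false i hi]; simp)]
  simp only [List.nil_append]
  -- now compare the two filtered first-occurrence lists
  by_cases hn : n ≤ 0
  · rw [pvSel_nonpos n hn data (fun _ => 0)]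
    simp only [pvDf, List.filter_nil]
    symm
    rw [List.filter_eq_nil_iff]
    intro e hedf
    have : 0 < pvCnt data (pvIx e) :=
      pvCnt_pos_of_mem data e (pvDf_subset data [] e hedf)
    simp only [decide_eq_true_eq]
    omega
  · push_neg at hn
    rw [pvDf_sel n (by omega) data [] (fun _ => 0) (by intro i; left; show ((0:Nat):Int) < max n 0; omega)]
    apply List.filter_congr
    intro e hedf
    have hcntpos : 0 < pvCnt data (pvIx e) :=
      pvCnt_pos_of_mem data e (pvDf_subset data [] e hedf)
    simp only [decide_eq_decide]
    constructor
    · intro h; omega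
    · intro h; omega
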